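-- pv_equiv track=rewrite | github.com/orzhan/rusimscore | tools.py | count_matching_entities
-- ===== SOURCE A (Python) =====
-- def match_entities(w, w0):
--   if len(w.split(' ')) == 1 and len(w0.split(' ')) == 1:
--     return w.lower() == w0.lower()
--   s = set(w.lower().split(' '))
--   s0 = set(w0.lower().split(' '))
--   if len(s.intersection(s0)) >= 1:
--     return True
--   else:
--     return False
--
-- def count_matching_entities(e, e0):
--   #return len(list(e.intersection(e0)))
--   n = 0
--   for w in e:
--     found = False
--     for w0 in e0:
--       if match_entities(w, w0):
--         found = True
--         break
--     if found:
--       n += 1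
--   return n
-- ===== SOURCE B (Python) =====
-- def count_matching_entities(e, e0):
--     # Build the union of all lowercase tokens of e0 once; an entity w matches some
--     # entity of e0 iff its token set meets this union (for single-word entities,
--     # equality of lowercased words is the same as sharing their unique token).
--     toks0 = set()
--     for w0 in e0:
--         toks0.update(w0.lower().split(' '))
--     return sum(1 for w in e if not toks0.isdisjoint(w.lower().split(' ')))
-- ===== Notes on version B (the rewrite author's own statement) =====
-- stated objective: faster
-- what changed: Replaces the nested scan (for each entity of e, try every entity of e0 with match_entities) by building the union set of all lowercase tokens of e0 once and counting entities of e whose token list meets that set, using that two single-word entities match iff they share their unique token.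
import Mathlib
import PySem

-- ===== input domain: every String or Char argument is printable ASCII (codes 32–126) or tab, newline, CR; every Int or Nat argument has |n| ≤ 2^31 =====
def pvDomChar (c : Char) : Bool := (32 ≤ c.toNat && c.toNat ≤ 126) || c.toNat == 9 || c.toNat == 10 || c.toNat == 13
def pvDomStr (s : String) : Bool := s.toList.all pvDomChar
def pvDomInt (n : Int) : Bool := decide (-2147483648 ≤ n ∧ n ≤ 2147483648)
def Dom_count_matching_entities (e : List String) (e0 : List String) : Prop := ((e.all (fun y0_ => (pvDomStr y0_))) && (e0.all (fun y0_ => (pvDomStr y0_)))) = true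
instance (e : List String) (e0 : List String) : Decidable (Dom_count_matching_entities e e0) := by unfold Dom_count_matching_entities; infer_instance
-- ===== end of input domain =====

-- B builds the union of all lowercase tokens of e0 once and counts entities of e whose
-- token list meets it, instead of A's nested per-pair match_entities scan (objective: faster).


-- shared stand-in for Python's s.split(' ') (separator is the literal nonempty " ",
-- so it never raises; this is PySem.Str.split? s " " with the `some` peeled off)
def pySplitSpace (s : String) : List String :=
  (PySem.Chars.splitOn s.toList [' ']).map String.ofList

-- ===== PORT A =====
def match_entities (w : String) (w0 : String) : Bool :=
  if (pySplitSpace w).length == 1 && (pySplitSpace w0).length == 1 then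
    PySem.Str.lower w == PySem.Str.lower w0
  else
    let s := PySem.Set.ofList (pySplitSpace (PySem.Str.lower w))
    let s0 := PySem.Set.ofList (pySplitSpace (PySem.Str.lower w0))
    if (1 : Int) ≤ PySem.Set.len (PySem.Set.inter s s0) then true else false

-- the inner 'for w0 in e0: … break' loop of A (found/break = return true on first hit)
def countMatchInner (w : String) : List String → Bool
  | [] => false
  | w0 :: rest => if match_entities w w0 then true else countMatchInner w rest

def count_matching_entities (e : List String) (e0 : List String) : Int :=
  e.foldl (fun n w => if countMatchInner w e0 then n + 1 else n) 0

-- ===== PORT B =====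
def count_matching_entities_alt (e : List String) (e0 : List String) : Int :=
  let toks0 := e0.foldl (fun s w0 => PySem.Set.update s (pySplitSpace (PySem.Str.lower w0))) PySem.Set.empty
  ((e.countP (fun w => !(PySem.Set.isdisjoint toks0 (pySplitSpace (PySem.Str.lower w))))) : Int)

-- ===== PRECONDITION & SPEC =====
def Spec_count_matching_entities (e : List String) (e0 : List String) (out : Int) : Prop := out = count_matching_entities_alt e e0
instance (e : List String) (e0 : List String) (out : Int) : Decidable (Spec_count_matching_entities e e0 out) := by unfold Spec_count_matching_entities; infer_instance

-- ===== CLAIM (what is proved, stated in full; the proofs are below) =====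
def Claim_equal_count_matching_entities : Prop := ∀ (e : List String) (e0 : List String), Dom_count_matching_entities e e0 → Spec_count_matching_entities e e0 (count_matching_entities e e0)

-- ===== LEMMAS AND PROOFS =====

-- the lowercase token list of an entity, as both programs compute it
def pvTok (w : String) : List String := pySplitSpace (PySem.Str.lower w)

-- unfolding equations for PySem.Chars.splitOn.go (definitional)
theorem pvGoZero (sep l cur : List Char) (acc : List (List Char)) :
    PySem.Chars.splitOn.go sep 0 l cur acc = ((cur.reverse ++ l) :: acc).reverse := rfl

theorem pvGoNil (sep cur : List Char) (acc : List (List Char)) (fuel : Nat) :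
    PySem.Chars.splitOn.go sep (fuel+1) [] cur acc = (cur.reverse :: acc).reverse := rfl

theorem pvGoCons (sep l cur : List Char) (acc : List (List Char)) (fuel : Nat) (c : Char) :
    PySem.Chars.splitOn.go sep (fuel+1) (c::l) cur acc =
      if sep.isPrefixOf (c::l) then PySem.Chars.splitOn.go sep fuel (List.drop sep.length (c::l)) [] (cur.reverse :: acc)
      else PySem.Chars.splitOn.go sep fuel l (c::cur) acc := rfl

theorem pvLowerCharSpace (c : Char) : PySem.Chars.lowerChar c = ' ' ↔ c = ' ' := by
  unfold PySem.Chars.lowerChar PySem.Chars.isupper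
  split_ifs with h
  · simp only [Bool.and_eq_true, decide_eq_true_eq] at h
    obtain ⟨h1, h2⟩ := h
    have hA : 65 ≤ c.toNat := UInt32.le_iff_toNat_le.mp (Char.le_def.mp h1)
    constructor
    · intro hc
      have hts := congrArg Char.toNat hc
      rw [Char.toNat_ofNat, if_pos (Or.inl (by
        have hZ : c.toNat ≤ 90 := UInt32.le_iff_toNat_le.mp (Char.le_def.mp h2)
        omega))] at hts
      have h32 : (' ' : Char).toNat = 32 := rfl
      omega
    · intro hc
      subst hc
      have h32 : (' ' : Char).toNat = 32 := rfl
      omega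
  · simp

-- splitting commutes with lowercasing (lowercasing fixes ' ' and maps nothing else to it)
theorem pvGoLower (fuel : Nat) : ∀ (l cur : List Char) (acc : List (List Char)),
    PySem.Chars.splitOn.go [' '] fuel (PySem.Chars.lower l) (PySem.Chars.lower cur) (acc.map PySem.Chars.lower)
      = (PySem.Chars.splitOn.go [' '] fuel l cur acc).map PySem.Chars.lower := by
  induction fuel with
  | zero =>
    intro l cur acc
    simp [pvGoZero, PySem.Chars.lower]
  | succ fuel ih =>
    intro l cur acc
    cases l with
    | nil => simp [pvGoNil, PySem.Chars.lower]
    | cons c rest =>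
      have hpre : ([' '] : List Char).isPrefixOf (PySem.Chars.lowerChar c :: PySem.Chars.lower rest)
          = ([' '] : List Char).isPrefixOf (c :: rest) := by
        simp only [List.isPrefixOf, Bool.and_true]
        by_cases hc : c = ' '
        · subst hc
          have hsp : PySem.Chars.lowerChar ' ' = ' ' := (pvLowerCharSpace ' ').mpr rfl
          simp [hsp]
        · have hne : PySem.Chars.lowerChar c ≠ ' ' := fun h => hc ((pvLowerCharSpace c).mp h)
          rw [Bool.eq_iff_iff]
          simp only [beq_iff_eq]
          exact ⟨fun h => absurd ((pvLowerCharSpace c).mp h.symm) hc,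
                 fun h => absurd h.symm hc⟩
      show PySem.Chars.splitOn.go [' '] (fuel+1)
            (PySem.Chars.lowerChar c :: PySem.Chars.lower rest) (PySem.Chars.lower cur) (acc.map PySem.Chars.lower) = _
      rw [pvGoCons, pvGoCons, hpre]
      by_cases h : ([' '] : List Char).isPrefixOf (c :: rest)
      · rw [if_pos h, if_pos h]
        have h1 : (PySem.Chars.lower rest) = PySem.Chars.lower (List.drop 1 (c :: rest)) := rfl
        have h2 : ((PySem.Chars.lower cur).reverse :: acc.map PySem.Chars.lower)
            = ((cur.reverse :: acc).map PySem.Chars.lower) := by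
          simp [PySem.Chars.lower]
        simp only [List.length_cons, List.length_nil]
        calc PySem.Chars.splitOn.go [' '] fuel (PySem.Chars.lower rest) [] ((PySem.Chars.lower cur).reverse :: acc.map PySem.Chars.lower)
            = PySem.Chars.splitOn.go [' '] fuel (PySem.Chars.lower (List.drop (0+1) (c :: rest))) (PySem.Chars.lower []) ((cur.reverse :: acc).map PySem.Chars.lower) := by
              rw [← h1, h2]; rfl
          _ = _ := by rw [ih]
      · rw [if_neg h, if_neg h]
        have h3 : (PySem.Chars.lowerChar c :: PySem.Chars.lower cur) = PySem.Chars.lower (c :: cur) := rfl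
        rw [h3, ih]

theorem pvSplitLower (l : List Char) :
    PySem.Chars.splitOn (PySem.Chars.lower l) [' '] = (PySem.Chars.splitOn l [' ']).map PySem.Chars.lower := by
  unfold PySem.Chars.splitOn
  have hlen : (PySem.Chars.lower l).length = l.length := by simp [PySem.Chars.lower]
  rw [hlen]
  have := pvGoLower (l.length + 1) l [] []
  simpa using this

-- go produces at least acc.length + 1 pieces
theorem pvGoLenGe (sep : List Char) (fuel : Nat) : ∀ (l cur : List Char) (acc : List (List Char)),
    acc.length + 1 ≤ (PySem.Chars.splitOn.go sep fuel l cur acc).length := by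
  induction fuel with
  | zero => intro l cur acc; simp [pvGoZero]
  | succ fuel ih =>
    intro l cur acc
    cases l with
    | nil => simp [pvGoNil]
    | cons c rest =>
      rw [pvGoCons]
      by_cases h : sep.isPrefixOf (c :: rest)
      · rw [if_pos h]
        have := ih (List.drop sep.length (c :: rest)) [] (cur.reverse :: acc)
        simp at this
        omega
      · rw [if_neg h]; exact ih rest (c :: cur) acc

-- a one-piece split is the whole input
theorem pvGoLenOne (sep : List Char) (fuel : Nat) : ∀ (l cur : List Char) (acc : List (List Char)),
    (PySem.Chars.splitOn.go sep fuel l cur acc).length = acc.length + 1 →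
    PySem.Chars.splitOn.go sep fuel l cur acc = acc.reverse ++ [cur.reverse ++ l] := by
  induction fuel with
  | zero => intro l cur acc _; simp [pvGoZero]
  | succ fuel ih =>
    intro l cur acc hlen
    cases l with
    | nil => simp [pvGoNil]
    | cons c rest =>
      rw [pvGoCons] at hlen ⊢
      by_cases h : sep.isPrefixOf (c :: rest)
      · exfalso
        rw [if_pos h] at hlen
        have := pvGoLenGe sep fuel (List.drop sep.length (c :: rest)) [] (cur.reverse :: acc)
        simp at this
        omega
      · rw [if_neg h] at hlen ⊢
        have := ih rest (c :: cur) acc hlen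
        simpa using this

theorem pvSplitLenOne (l : List Char) (h : (PySem.Chars.splitOn l [' ']).length = 1) :
    PySem.Chars.splitOn l [' '] = [l] := by
  unfold PySem.Chars.splitOn at h ⊢
  have := pvGoLenOne [' '] (l.length + 1) l [] [] (by simpa using h)
  simpa using this

-- pvTok via mapping lower over the raw split
theorem pvTok_eq (w : String) : pvTok w = (pySplitSpace w).map PySem.Str.lower := by
  unfold pvTok pySplitSpace
  have hb : (PySem.Str.lower w).toList = PySem.Chars.lower w.toList := by
    simp [PySem.Str.lower]
  rw [hb, pvSplitLower, List.map_map, List.map_map]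
  apply List.map_congr_left
  intro cs _
  simp [Function.comp, PySem.Str.lower]

theorem pvInner_iff (w : String) (l : List String) :
    countMatchInner w l = true ↔ ∃ w0 ∈ l, match_entities w w0 = true := by
  induction l with
  | nil => simp [countMatchInner]
  | cons w0 rest ih =>
    simp only [countMatchInner]
    by_cases h : match_entities w w0 = true
    · simp [h]
    · simp [h, ih]

theorem pvMatch_iff (w w0 : String) :
    match_entities w w0 = true ↔ ∃ t, t ∈ pvTok w ∧ t ∈ pvTok w0 := by
  unfold match_entities
  by_cases h : ((pySplitSpace w).length == 1 && (pySplitSpace w0).length == 1) = true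
  · rw [if_pos h]
    simp only [Bool.and_eq_true, beq_iff_eq] at h
    obtain ⟨h1, h2⟩ := h
    have e1 : pySplitSpace w = [w] := by
      unfold pySplitSpace at h1 ⊢
      rw [pvSplitLenOne w.toList (by simpa using h1)]
      simp [String.ofList_toList]
    have e2 : pySplitSpace w0 = [w0] := by
      unfold pySplitSpace at h2 ⊢
      rw [pvSplitLenOne w0.toList (by simpa using h2)]
      simp [String.ofList_toList]
    rw [pvTok_eq, pvTok_eq, e1, e2]
    simp [beq_iff_eq]
  · rw [if_neg h]
    show (if (1 : Int) ≤ PySem.Set.len (PySem.Set.inter (PySem.Set.ofList (pySplitSpace (PySem.Str.lower w))) (PySem.Set.ofList (pySplitSpace (PySem.Str.lower w0)))) then true else false) = true ↔ _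
    by_cases hc : (1 : Int) ≤ PySem.Set.len (PySem.Set.inter (PySem.Set.ofList (pySplitSpace (PySem.Str.lower w))) (PySem.Set.ofList (pySplitSpace (PySem.Str.lower w0))))
    · rw [if_pos hc]
      constructor
      · intro _
        have hne : PySem.Set.inter (PySem.Set.ofList (pySplitSpace (PySem.Str.lower w))) (PySem.Set.ofList (pySplitSpace (PySem.Str.lower w0))) ≠ [] := by
          intro he
          rw [he] at hc
          simp [PySem.Set.len] at hc
        obtain ⟨t, ht⟩ := List.exists_mem_of_ne_nil _ hne
        rw [PySem.Set.mem_inter, PySem.Set.mem_ofList, PySem.Set.mem_ofList] at ht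
        exact ⟨t, ht.1, ht.2⟩
      · intro _; rfl
    · rw [if_neg hc]
      constructor
      · intro hfalse
        exact absurd hfalse (by simp)
      · rintro ⟨t, ht1, ht2⟩
        exfalso
        apply hc
        have hmem : t ∈ PySem.Set.inter (PySem.Set.ofList (pySplitSpace (PySem.Str.lower w))) (PySem.Set.ofList (pySplitSpace (PySem.Str.lower w0))) := by
          rw [PySem.Set.mem_inter, PySem.Set.mem_ofList, PySem.Set.mem_ofList]
          exact ⟨ht1, ht2⟩
        have hlen := List.length_pos_of_mem hmem
        simp only [PySem.Set.len]
        omega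

theorem pvToks0_mem (l : List String) : ∀ (s : PySem.Set String) (t : String),
    (t ∈ l.foldl (fun s w0 => PySem.Set.update s (pySplitSpace (PySem.Str.lower w0))) s)
      ↔ t ∈ s ∨ ∃ w0 ∈ l, t ∈ pvTok w0 := by
  induction l with
  | nil => intro s t; simp
  | cons w0 rest ih =>
    intro s t
    simp only [List.foldl_cons, ih, PySem.Set.mem_update, List.mem_cons]
    simp only [pvTok]
    constructor
    · rintro (⟨h | h⟩ | ⟨w1, hw1, ht⟩)
      · exact Or.inl h
      · exact Or.inr ⟨w0, Or.inl rfl, h⟩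
      · exact Or.inr ⟨w1, Or.inr hw1, ht⟩
    · rintro (h | ⟨w1, (rfl | hw1), ht⟩)
      · exact Or.inl (Or.inl h)
      · exact Or.inl (Or.inr ht)
      · exact Or.inr ⟨w1, hw1, ht⟩

-- the pointwise fact: A's inner loop hits iff w's token list meets B's token-union set
theorem pvPoint (e0 : List String) (w : String) :
    countMatchInner w e0 = true
      ↔ ∃ t, t ∈ (e0.foldl (fun s w0 => PySem.Set.update s (pySplitSpace (PySem.Str.lower w0))) PySem.Set.empty) ∧ t ∈ pySplitSpace (PySem.Str.lower w) := by
  rw [pvInner_iff]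
  constructor
  · rintro ⟨w0, hw0, hm⟩
    obtain ⟨t, ht1, ht2⟩ := (pvMatch_iff w w0).mp hm
    exact ⟨t, (pvToks0_mem e0 PySem.Set.empty t).mpr (Or.inr ⟨w0, hw0, ht2⟩), ht1⟩
  · rintro ⟨t, htm, htw⟩
    rcases (pvToks0_mem e0 PySem.Set.empty t).mp htm with h | ⟨w0, hw0, ht0⟩
    · exact absurd h (by simp [PySem.Set.empty])
    · exact ⟨w0, hw0, (pvMatch_iff w w0).mpr ⟨t, htw, ht0⟩⟩

-- ===== VERDICT (by name: the statement is the Claim_ definition above) =====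
theorem count_matching_entities_spec : Claim_equal_count_matching_entities := by
  unfold Claim_equal_count_matching_entities
  intro e e0 _
  unfold Spec_count_matching_entities count_matching_entities count_matching_entities_alt
  rw [PySem.List.foldl_count_if]
  simp only [zero_add]
  congr 1
  apply List.countP_congr
  intro w _
  rw [pvPoint e0 w]
  rw [Bool.not_eq_true']
  constructor
  · rintro ⟨t, h1, h2⟩
    rw [Bool.eq_false_iff]
    intro hd
    exact ((PySem.Set.isdisjoint_iff _ _).mp hd) t h1 h2
  · intro hd
    by_contra hno
    push Not at hno
    rw [(PySem.Set.isdisjoint_iff _ _).mpr hno] at hd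
    simp at hd
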